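-- pv_equiv track=rewrite | github.com/ey242/KiVA | colab_helper_functions/helper_kiva_iccv.py | extract_model_answer
-- ===== SOURCE A (Python) =====
-- def extract_model_answer(response_text):
--     options = ["A", "B", "C", "D"]
--     model_option = None
--     earliest_index = len(response_text)
--
--     for opt in options:
--         paren_form = f"({opt})"
--         bare_form = opt
--
--         for form in [paren_form, bare_form]:
--             idx = response_text.find(form)
--             if idx != -1 and idx < earliest_index:
--                 earliest_index = idx
--                 model_option = paren_form  # Always return in (A) format
--
--     return model_option if model_option is not None else "Null"
-- ===== SOURCE B (Python) =====
-- def extract_model_answer(response_text):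
--     for c in response_text:
--         if c in "ABCD":
--             return f"({c})"
--     return "Null"
-- ===== Notes on version B (the rewrite author's own statement) =====
-- stated objective: simpler
-- what changed: Replaced A's eight substring-find passes (paren and bare form per option) with a running minimum by a single left-to-right scan that returns the parenthesized form of the first character that is one of the four option letters, using the fact that A's earliest-index-with-strict-improvement selection always picks that character's option and always returns the parenthesized form.
import Mathlib
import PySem

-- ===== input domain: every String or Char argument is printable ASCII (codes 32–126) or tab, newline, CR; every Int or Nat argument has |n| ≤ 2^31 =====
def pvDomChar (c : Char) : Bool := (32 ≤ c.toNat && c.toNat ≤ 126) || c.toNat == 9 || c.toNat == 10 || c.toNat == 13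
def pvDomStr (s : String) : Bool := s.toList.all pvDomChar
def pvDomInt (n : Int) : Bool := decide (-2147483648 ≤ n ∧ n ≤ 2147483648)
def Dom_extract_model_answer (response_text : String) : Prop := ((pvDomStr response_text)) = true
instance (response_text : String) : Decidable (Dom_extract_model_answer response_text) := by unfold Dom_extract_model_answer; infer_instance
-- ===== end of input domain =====

-- B replaces A's eight substring-find passes plus running minimum with one left-to-right character scan (objective: simpler).

-- ===== PORT A =====
-- literal port of A: loop over the four options, find paren and bare forms with str.find,
-- keep the strictly-earliest index with the paren form recorded (strings handled as List Char per PySem).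
def extract_model_answer (response_text : String) : String :=
  let s := response_text.toList
  let options : List (List Char) := [['A'], ['B'], ['C'], ['D']]
  let res := options.foldl (fun st opt =>
      let paren_form := '(' :: (opt ++ [')'])
      let bare_form := opt
      [paren_form, bare_form].foldl (fun st2 form =>
        let idx := PySem.Chars.find s form
        if idx ≠ -1 ∧ idx < st2.2 then (some paren_form, idx) else st2) st)
    ((none : Option (List Char)), (s.length : Int))
  match res.1 with
  | some mo => String.ofList mo
  | none => "Null"

-- ===== PORT B =====
-- port of B: return "(c)" for the first character c of the text that is one of A,B,C,D; else "Null".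
def extract_model_answer_alt (response_text : String) : String :=
  match response_text.toList.find? (fun c => c ∈ ['A', 'B', 'C', 'D']) with
  | some c => String.ofList ['(', c, ')']
  | none => "Null"

-- ===== PRECONDITION & SPEC =====
def Spec_extract_model_answer (response_text : String) (out : String) : Prop := out = extract_model_answer_alt response_text
instance (response_text : String) (out : String) : Decidable (Spec_extract_model_answer response_text out) := by unfold Spec_extract_model_answer; infer_instance

-- ===== CLAIM (what is proved, stated in full; the proofs are below) =====
def Claim_equal_extract_model_answer : Prop := ∀ (response_text : String), Dom_extract_model_answer response_text → Spec_extract_model_answer response_text (extract_model_answer response_text)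

-- ===== LEMMAS AND PROOFS =====

-- the composite step A performs for one option (paren form then bare form), identical to the port's inner foldl
def pvOpt (s : List Char) (opt : List Char) (st : Option (List Char) × Int) : Option (List Char) × Int :=
  let paren_form := '(' :: (opt ++ [')'])
  let bare_form := opt
  [paren_form, bare_form].foldl (fun st2 form =>
    let idx := PySem.Chars.find s form
    if idx ≠ -1 ∧ idx < st2.2 then (some paren_form, idx) else st2) st

lemma extract_eq_pvOpt (rt : String) :
    extract_model_answer rt =
      (match (pvOpt rt.toList ['D'] (pvOpt rt.toList ['C'] (pvOpt rt.toList ['B']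
            (pvOpt rt.toList ['A'] (none, (rt.toList.length : Int)))))).1 with
       | some mo => String.ofList mo
       | none => "Null") := rfl

-- a singleton list is a prefix of `s.drop i` iff s has c at position i
lemma singleton_prefix_drop {s : List Char} {c : Char} {i : Nat} :
    [c] <+: s.drop i ↔ ∃ h : i < s.length, s[i] = c := by
  constructor
  · rintro ⟨t, ht⟩
    have hlen : i < s.length := by
      by_contra h
      have : s.drop i = [] := List.drop_eq_nil_of_le (by omega)
      simp [this] at ht
    refine ⟨hlen, ?_⟩
    have := List.drop_eq_getElem_cons hlen
    rw [this] at ht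
    exact (List.cons_eq_cons.mp ht.symm).1
  · rintro ⟨h, hc⟩
    rw [List.drop_eq_getElem_cons h]
    exact ⟨s.drop (i+1), by simp [hc]⟩

-- if L is a prefix of s.drop r then each element of L sits at r+j in s
lemma prefix_drop_getElem {s L : List Char} {r : Nat} (h : L <+: s.drop r)
    (j : Nat) (hj : j < L.length) : ∃ hb : r + j < s.length, s[r + j] = L[j] := by
  have hlen : L.length ≤ (s.drop r).length := h.length_le
  have hb : r + j < s.length := by simp at hlen; omega
  have hj' : j < (s.drop r).length := by simp; omega
  have := h.getElem hj
  rw [List.getElem_drop] at this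
  exact ⟨hb, this.symm⟩

-- characterization of the bare-form find when c's first occurrence is at q
lemma find_bare_eq {s : List Char} {c : Char} {q : Nat} (hq : q < s.length) (hc : s[q] = c)
    (hmin : ∀ i, (hi : i < q) → s[i]'(by omega) ≠ c) :
    PySem.Chars.find s [c] = (q : Int) := by
  have hinf : [c] <+: s.drop q := singleton_prefix_drop.mpr ⟨hq, hc⟩
  have h0 : 0 ≤ PySem.Chars.find s [c] := by
    rw [PySem.Chars.find_nonneg_iff]
    exact (PySem.Chars.isIn_iff_infix _ _).mp
      ((PySem.Chars.exists_prefix_drop_iff_isIn _ _).mp ⟨q, hinf⟩)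
  obtain ⟨hpre, hmin'⟩ := PySem.Chars.find_spec (s := s) (sub := [c]) h0
  set t := (PySem.Chars.find s [c]).toNat with ht
  have htq : t ≤ q := by
    by_contra h
    exact hmin' q (by omega) hinf
  obtain ⟨hb, he⟩ := singleton_prefix_drop.mp hpre
  have : t = q := by
    by_contra h
    exact hmin t (by omega) he
  omega

-- bare form of a letter other than the first option letter: absent or strictly after q
lemma find_bare_gt {s : List Char} {X : Char} {q : Nat} (hq : q < s.length) (hne : s[q] ≠ X)
    (hmin : ∀ i, (hi : i < q) → s[i]'(by omega) ≠ X) :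
    PySem.Chars.find s [X] = -1 ∨ (q : Int) < PySem.Chars.find s [X] := by
  by_cases h : PySem.Chars.find s [X] = -1
  · exact Or.inl h
  · right
    have h0 : 0 ≤ PySem.Chars.find s [X] := by
      have := PySem.Chars.neg_one_le_find (s := s) (sub := [X]); omega
    obtain ⟨hpre, _⟩ := PySem.Chars.find_spec (s := s) (sub := [X]) h0
    set t := (PySem.Chars.find s [X]).toNat with ht
    obtain ⟨hb, he⟩ := singleton_prefix_drop.mp hpre
    have : q < t := by
      rcases Nat.lt_trichotomy t q with h1 | h1 | h1
      · exact absurd he (hmin t h1)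
      · subst h1; exact absurd he hne
      · exact h1
    omega

-- paren form of a letter X: absent, or strictly after q, provided s[q] is a letter (≠ '(')
-- that differs from X and no position before q holds X
lemma find_paren_gt {s : List Char} {X : Char} {q : Nat} (hq : q < s.length)
    (hqp : s[q] ≠ '(') (hne : s[q] ≠ X)
    (hmin : ∀ i, (hi : i < q) → s[i]'(by omega) ≠ X) :
    PySem.Chars.find s ['(', X, ')'] = -1 ∨ (q : Int) < PySem.Chars.find s ['(', X, ')'] := by
  by_cases h : PySem.Chars.find s ['(', X, ')'] = -1
  · exact Or.inl h
  · right
    have h0 : 0 ≤ PySem.Chars.find s ['(', X, ')'] := by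
      have := PySem.Chars.neg_one_le_find (s := s) (sub := ['(', X, ')']); omega
    obtain ⟨hpre, _⟩ := PySem.Chars.find_spec (s := s) (sub := ['(', X, ')']) h0
    set r := (PySem.Chars.find s ['(', X, ')']).toNat with hr
    obtain ⟨hb0, he0⟩ := prefix_drop_getElem hpre 0 (by norm_num)
    obtain ⟨hb1, he1⟩ := prefix_drop_getElem hpre 1 (by norm_num)
    simp at he0 he1
    have : q < r := by
      rcases Nat.lt_trichotomy (r + 1) q with h1 | h1 | h1
      · exact absurd he1 (hmin (r+1) h1)
      · subst h1
        exact absurd he1 hne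
      · rcases Nat.lt_or_ge q r with h2 | h2
        · exact h2
        · have hrq : r = q := by omega
          subst hrq
          exact absurd he0 hqp
    omega

-- pvOpt leaves the state unchanged when both forms are absent or no earlier than st.2
lemma pvOpt_skip {s : List Char} {X : Char} {st : Option (List Char) × Int}
    (hp : PySem.Chars.find s ['(', X, ')'] = -1 ∨ st.2 ≤ PySem.Chars.find s ['(', X, ')'])
    (hb : PySem.Chars.find s [X] = -1 ∨ st.2 ≤ PySem.Chars.find s [X]) :
    pvOpt s [X] st = st := by
  have hnp : ¬(PySem.Chars.find s ['(', X, ')'] ≠ -1 ∧ PySem.Chars.find s ['(', X, ')'] < st.2) := by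
    rcases hp with hp | hp
    · simp [hp]
    · rintro ⟨_, h⟩; omega
  have hnb : ¬(PySem.Chars.find s [X] ≠ -1 ∧ PySem.Chars.find s [X] < st.2) := by
    rcases hb with hb | hb
    · simp [hb]
    · rintro ⟨_, h⟩; omega
  unfold pvOpt
  simp only [List.foldl, List.cons_append, List.nil_append]
  rw [if_neg hnp, if_neg hnb]

-- pvOpt keeps st.2 above q when both forms are absent or strictly after q
lemma pvOpt_gt {s : List Char} {X : Char} {st : Option (List Char) × Int} {q : Nat}
    (hst : (q : Int) < st.2)
    (hp : PySem.Chars.find s ['(', X, ')'] = -1 ∨ (q : Int) < PySem.Chars.find s ['(', X, ')'])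
    (hb : PySem.Chars.find s [X] = -1 ∨ (q : Int) < PySem.Chars.find s [X]) :
    (q : Int) < (pvOpt s [X] st).2 := by
  unfold pvOpt
  simp only [List.foldl, List.cons_append, List.nil_append]
  split_ifs with h1 h2 h2 <;> simp_all

-- processing the first option letter c (bare find = q, q < st.2) records the paren form,
-- and the recorded index drops to at most q
lemma pvOpt_hit {s : List Char} {c : Char} {st : Option (List Char) × Int} {q : Nat}
    (hbare : PySem.Chars.find s [c] = (q : Int)) (hst : (q : Int) < st.2) :
    (pvOpt s [c] st).1 = some ['(', c, ')'] ∧ (pvOpt s [c] st).2 ≤ (q : Int) := by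
  unfold pvOpt
  simp only [List.foldl, List.cons_append, List.nil_append]
  split_ifs with h1 h2 h2 <;> simp_all

-- weaken a "strictly after q" bound to an "at or after st.2" bound when st.2 ≤ q
lemma or_le_of_gt {a e : Int} {q : Nat} (h : a = -1 ∨ (q : Int) < a) (hb : e ≤ (q : Int)) :
    a = -1 ∨ e ≤ a := h.imp id (fun h' => by omega)

-- when no position of s holds X, both of X's forms are absent
lemma find_both_neg_one {s : List Char} {X : Char}
    (h : ∀ i, (hi : i < s.length) → s[i] ≠ X) :
    PySem.Chars.find s [X] = -1 ∧ PySem.Chars.find s ['(', X, ')'] = -1 := by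
  constructor
  · by_contra hne
    have h0 : 0 ≤ PySem.Chars.find s [X] := by
      have := PySem.Chars.neg_one_le_find (s := s) (sub := [X]); omega
    obtain ⟨hpre, _⟩ := PySem.Chars.find_spec (s := s) (sub := [X]) h0
    obtain ⟨hb, he⟩ := singleton_prefix_drop.mp hpre
    exact h _ hb he
  · by_contra hne
    have h0 : 0 ≤ PySem.Chars.find s ['(', X, ')'] := by
      have := PySem.Chars.neg_one_le_find (s := s) (sub := ['(', X, ')']); omega
    obtain ⟨hpre, _⟩ := PySem.Chars.find_spec (s := s) (sub := ['(', X, ')']) h0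
    obtain ⟨hb1, he1⟩ := prefix_drop_getElem hpre 1 (by norm_num)
    simp at he1
    exact h _ hb1 he1

-- ===== VERDICT (by name: the statement is the Claim_ definition above) =====
theorem extract_model_answer_spec : Claim_equal_extract_model_answer := by
  intro rt _
  unfold Spec_extract_model_answer extract_model_answer_alt
  rw [extract_eq_pvOpt]
  set s := rt.toList with hs
  cases hf : s.find? (fun c => c ∈ ['A', 'B', 'C', 'D']) with
  | none =>
    have hall : ∀ X : Char, ∀ i, (hi : i < s.length) → s[i] ≠ X ∨ X ∉ (['A','B','C','D'] : List Char) := by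
      intro X i hi
      by_cases hx : X ∈ (['A','B','C','D'] : List Char)
      · left
        intro he
        have := List.find?_eq_none.mp hf s[i] (List.getElem_mem hi)
        rw [he] at this
        simp [hx] at this
      · exact Or.inr hx
    have hone : ∀ X : Char, X ∈ (['A','B','C','D'] : List Char) →
        PySem.Chars.find s [X] = -1 ∧ PySem.Chars.find s ['(', X, ')'] = -1 := by
      intro X hX
      refine find_both_neg_one (fun i hi => ?_)
      rcases hall X i hi with h | h
      · exact h
      · exact absurd hX h
    obtain ⟨ba, pa⟩ := hone 'A' (by simp)
    obtain ⟨bb, pb⟩ := hone 'B' (by simp)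
    obtain ⟨bc, pc⟩ := hone 'C' (by simp)
    obtain ⟨bd, pd⟩ := hone 'D' (by simp)
    rw [pvOpt_skip (Or.inl pa) (Or.inl ba), pvOpt_skip (Or.inl pb) (Or.inl bb),
        pvOpt_skip (Or.inl pc) (Or.inl bc), pvOpt_skip (Or.inl pd) (Or.inl bd)]
  | some c =>
    rw [List.find?_eq_some_iff_getElem] at hf
    obtain ⟨hcmem, q, hq, hcq, hbefore⟩ := hf
    simp only [decide_eq_true_eq] at hcmem
    have hcmem : c = 'A' ∨ c = 'B' ∨ c = 'C' ∨ c = 'D' := by simpa using hcmem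
    have hmin : ∀ X : Char, X ∈ (['A','B','C','D'] : List Char) →
        ∀ i, (hi : i < q) → s[i]'(by omega) ≠ X := by
      intro X hX i hi he
      have := hbefore i hi
      rw [he] at this
      simp [hX] at this
    have hqlen : (q : Int) < (s.length : Int) := by exact_mod_cast hq
    have hqp : s[q] ≠ '(' := by
      rw [hcq]; rcases hcmem with h | h | h | h <;> subst h <;> decide
    -- four symmetric cases on which letter comes first
    rcases hcmem with h | h | h | h <;> subst h
    · -- c = 'A'
      obtain ⟨r1, r2⟩ := pvOpt_hit (st := (none, (s.length : Int)))
        (find_bare_eq hq hcq (hmin 'A' (by simp))) hqlen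
      have hB := find_bare_gt hq (by rw [hcq]; decide) (hmin 'B' (by simp))
      have hpB := find_paren_gt hq hqp (by rw [hcq]; decide) (hmin 'B' (by simp))
      have hC := find_bare_gt hq (by rw [hcq]; decide) (hmin 'C' (by simp))
      have hpC := find_paren_gt hq hqp (by rw [hcq]; decide) (hmin 'C' (by simp))
      have hD := find_bare_gt hq (by rw [hcq]; decide) (hmin 'D' (by simp))
      have hpD := find_paren_gt hq hqp (by rw [hcq]; decide) (hmin 'D' (by simp))
      rw [pvOpt_skip (or_le_of_gt hpB r2) (or_le_of_gt hB r2)]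
      rw [pvOpt_skip (or_le_of_gt hpC r2) (or_le_of_gt hC r2)]
      rw [pvOpt_skip (or_le_of_gt hpD r2) (or_le_of_gt hD r2)]
      rw [r1]
    · -- c = 'B'
      have hA := find_bare_gt hq (by rw [hcq]; decide) (hmin 'A' (by simp))
      have hpA := find_paren_gt hq hqp (by rw [hcq]; decide) (hmin 'A' (by simp))
      have g1 := pvOpt_gt (st := (none, (s.length : Int))) hqlen hpA hA
      obtain ⟨r1, r2⟩ := pvOpt_hit (find_bare_eq hq hcq (hmin 'B' (by simp))) g1
      have hC := find_bare_gt hq (by rw [hcq]; decide) (hmin 'C' (by simp))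
      have hpC := find_paren_gt hq hqp (by rw [hcq]; decide) (hmin 'C' (by simp))
      have hD := find_bare_gt hq (by rw [hcq]; decide) (hmin 'D' (by simp))
      have hpD := find_paren_gt hq hqp (by rw [hcq]; decide) (hmin 'D' (by simp))
      rw [pvOpt_skip (or_le_of_gt hpC r2) (or_le_of_gt hC r2)]
      rw [pvOpt_skip (or_le_of_gt hpD r2) (or_le_of_gt hD r2)]
      rw [r1]
    · -- c = 'C'
      have hA := find_bare_gt hq (by rw [hcq]; decide) (hmin 'A' (by simp))
      have hpA := find_paren_gt hq hqp (by rw [hcq]; decide) (hmin 'A' (by simp))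
      have hB := find_bare_gt hq (by rw [hcq]; decide) (hmin 'B' (by simp))
      have hpB := find_paren_gt hq hqp (by rw [hcq]; decide) (hmin 'B' (by simp))
      have g1 := pvOpt_gt (st := (none, (s.length : Int))) hqlen hpA hA
      have g2 := pvOpt_gt g1 hpB hB
      obtain ⟨r1, r2⟩ := pvOpt_hit (find_bare_eq hq hcq (hmin 'C' (by simp))) g2
      have hD := find_bare_gt hq (by rw [hcq]; decide) (hmin 'D' (by simp))
      have hpD := find_paren_gt hq hqp (by rw [hcq]; decide) (hmin 'D' (by simp))
      rw [pvOpt_skip (or_le_of_gt hpD r2) (or_le_of_gt hD r2)]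
      rw [r1]
    · -- c = 'D'
      have hA := find_bare_gt hq (by rw [hcq]; decide) (hmin 'A' (by simp))
      have hpA := find_paren_gt hq hqp (by rw [hcq]; decide) (hmin 'A' (by simp))
      have hB := find_bare_gt hq (by rw [hcq]; decide) (hmin 'B' (by simp))
      have hpB := find_paren_gt hq hqp (by rw [hcq]; decide) (hmin 'B' (by simp))
      have hC := find_bare_gt hq (by rw [hcq]; decide) (hmin 'C' (by simp))
      have hpC := find_paren_gt hq hqp (by rw [hcq]; decide) (hmin 'C' (by simp))
      have g1 := pvOpt_gt (st := (none, (s.length : Int))) hqlen hpA hA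
      have g2 := pvOpt_gt g1 hpB hB
      have g3 := pvOpt_gt g2 hpC hC
      obtain ⟨r1, _⟩ := pvOpt_hit (find_bare_eq hq hcq (hmin 'D' (by simp))) g3
      rw [r1]
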